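-- pv_equiv track=rewrite | github.com/ChinemeremChigbo/CodingProblems | Google/Kick Start/2021/Round H/A.py | func
-- ===== SOURCE A (Python) =====
-- def func(s,f):
--     goal = set(f)
--     total = 0
--     closest = {}
--     for letter in "abcdefghijklmnopqrstuvwxyz":
--         for g in goal:
--             lp = ord(letter) - ord("a")
--             lg = ord(g) - ord("a")
--             dist = min(abs(lg - lp),26 - abs(lg - lp))
--             if letter not in closest:
--                 closest[letter] = dist
--             else:
--                 closest[letter] = min(closest[letter],dist)
--     for l in s:
--         total += closest[l]
--     return total
-- ===== SOURCE B (Python) =====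
-- def func(s, f):
--     # Binary-search reformulation: per character, nearest goal offset via lower-bound
--     # search in the sorted distinct goal offsets, using the identity
--     # min_g min(|g-lp|, 26-|g-lp|) = min(min_g |g-lp|, 26 - max_g |g-lp|).
--     if not s:
--         return 0
--     gs = sorted({ord(g) - 97 for g in f})
--     n = len(gs)
--     total = 0
--     for l in s:
--         lp = ord(l) - 97
--         lo, hi = 0, n
--         while lo < hi:
--             mid = (lo + hi) // 2
--             if gs[mid] < lp:
--                 lo = mid + 1
--             else:
--                 hi = mid
--         if lo == n:
--             near = lp - gs[n - 1]
--         elif lo == 0: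
--             near = gs[0] - lp
--         else:
--             near = min(gs[lo] - lp, lp - gs[lo - 1])
--         far = max(gs[n - 1] - lp, lp - gs[0])
--         total += min(near, 26 - far)
--     return total
-- ===== Notes on version B (the rewrite author's own statement) =====
-- stated objective: alternative
-- what changed: B replaces A's 26-letter-by-goal-set distance table with a per-character lower-bound binary search in the sorted distinct goal offsets, using the identity min_g min(|g-lp|,26-|g-lp|) = min(nearest |g-lp|, 26 - farthest |g-lp|), so no scan over the goal set per letter remains.
import Mathlib
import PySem

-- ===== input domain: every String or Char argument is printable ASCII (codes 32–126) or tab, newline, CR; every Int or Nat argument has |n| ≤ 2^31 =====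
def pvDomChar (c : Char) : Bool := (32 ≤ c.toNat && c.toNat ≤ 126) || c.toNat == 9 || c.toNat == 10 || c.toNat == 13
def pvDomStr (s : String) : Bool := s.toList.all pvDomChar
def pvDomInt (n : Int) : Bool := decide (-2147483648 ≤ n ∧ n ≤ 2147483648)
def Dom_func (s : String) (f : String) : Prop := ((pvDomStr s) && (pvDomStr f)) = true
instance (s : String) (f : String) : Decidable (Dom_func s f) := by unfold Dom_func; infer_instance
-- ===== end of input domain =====

-- B replaces A's 26×|set(f)| distance-table build by a lower-bound binary search in the sorted
-- distinct goal offsets plus the identity min_g min(|g-lp|,26-|g-lp|) = min(nearest,26-farthest)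
-- (objective: alternative; similar cost).

-- ===== PORT A =====
def func (s : String) (f : String) : Int :=
  let goal : PySem.Set Char := PySem.Set.ofList f.toList
  let closest : PySem.Dict Char Int :=
    "abcdefghijklmnopqrstuvwxyz".toList.foldl
      (fun closest letter =>
        goal.foldl
          (fun closest g =>
            let lp : Int := (letter.toNat : Int) - 97   -- ord(letter) - ord("a"); ord("a") = 97
            let lg : Int := (g.toNat : Int) - 97
            let dist : Int := min |lg - lp| (26 - |lg - lp|)
            if closest.contains letter = false then
              closest.insert letter dist
            else
              closest.insert letter (min (closest.getD letter 0) dist))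
          closest)
      PySem.Dict.empty
  -- closest[l] raises KeyError when l is absent — those inputs are excluded by Pre_func,
  -- on which the key is always present, so getD 0 is exact there
  s.toList.foldl (fun total l => total + closest.getD l 0) 0

-- ===== PORT B =====
-- the while loop of Source B: lo/hi are Python ints that stay in 0..len(gs), so Nat is exact here,
-- and (lo+hi)//2 on nonnegative ints is Nat division
def pvLowerBound (gs : List Int) (lp : Int) (lo hi : Nat) : Nat :=
  if lo < hi then
    let mid := (lo + hi) / 2
    if gs.getD mid 0 < lp then pvLowerBound gs lp (mid + 1) hi
    else pvLowerBound gs lp lo mid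
  else lo
termination_by hi - lo
decreasing_by all_goals omega

def func_alt (s : String) (f : String) : Int :=
  if s.toList = [] then (0 : Int)
  else
    let gs : List Int :=
      PySem.List.sorted (PySem.Set.ofList (f.toList.map (fun g => (g.toNat : Int) - 97))) (fun x => x) false
    let n : Nat := gs.length
    -- all gs[...] indices below are in range whenever f is nonempty (n ≥ 1), which Pre_func
    -- guarantees for nonempty s; getD 0 is exact there (Python would raise IndexError on empty gs)
    s.toList.foldl
      (fun total l =>
        let lp : Int := (l.toNat : Int) - 97
        let lo := pvLowerBound gs lp 0 n
        let near : Int :=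
          if lo = n then lp - gs.getD (n - 1) 0
          else if lo = 0 then gs.getD 0 0 - lp
          else min (gs.getD lo 0 - lp) (lp - gs.getD (lo - 1) 0)
        let far : Int := max (gs.getD (n - 1) 0 - lp) (lp - gs.getD 0 0)
        total + min near (26 - far))
      0

-- ===== PRECONDITION & SPEC =====
-- Pre_func excludes exactly the inputs on which A raises KeyError: a nonempty s together with
-- an empty f, or any character of s outside 'a'..'z' (the only keys A's table ever holds).
def Pre_func (s : String) (f : String) : Prop :=
  s.toList = [] ∨ (f.toList ≠ [] ∧ s.toList.all (fun c => 97 ≤ c.toNat && c.toNat ≤ 122) = true)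
instance (s : String) (f : String) : Decidable (Pre_func s f) := by unfold Pre_func; infer_instance

def pvWitness_func : String × String := ("abz", "cx")

def Spec_func (s : String) (f : String) (out : Int) : Prop := out = func_alt s f
instance (s : String) (f : String) (out : Int) : Decidable (Spec_func s f out) := by unfold Spec_func; infer_instance

-- ===== CLAIM (what is proved, stated in full; the proofs are below) =====
def Claim_equal_func : Prop := ∀ (s : String) (f : String), Dom_func s f → Pre_func s f → Spec_func s f (func s f)

-- ===== LEMMAS AND PROOFS =====

-- cyclic distance between two letter offsets
def pvD (lp g : Int) : Int := min |g - lp| (26 - |g - lp|)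
-- letter offset
def pvLg (c : Char) : Int := (c.toNat : Int) - 97
-- A's inner-loop step for a fixed letter
def pvStepA (letter : Char) (c : PySem.Dict Char Int) (g : Char) : PySem.Dict Char Int :=
  if c.contains letter = false then
    c.insert letter (pvD (pvLg letter) (pvLg g))
  else
    c.insert letter (min (c.getD letter 0) (pvD (pvLg letter) (pvLg g)))

lemma func_eq (s f : String) :
    func s f = s.toList.foldl
      (fun total l => total +
        ("abcdefghijklmnopqrstuvwxyz".toList.foldl
          (fun c letter => (PySem.Set.ofList f.toList).foldl (pvStepA letter) c)
          PySem.Dict.empty).getD l 0) 0 := rfl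

lemma pvLg_inj : Function.Injective pvLg := by
  intro a b h
  unfold pvLg at h
  have h2 : a.toNat = b.toNat := by omega
  apply Char.ext; unfold Char.toNat at h2; exact UInt32.toNat_inj.mp h2

lemma foldl_min_perm (a : Int) (t : List Int) (b : Int) (u : List Int)
    (hp : (a :: t).Perm (b :: u)) : t.foldl min a = u.foldl min b := by
  obtain ⟨h1a, h1t⟩ := PySem.List.foldl_min_le t a
  obtain ⟨h2b, h2u⟩ := PySem.List.foldl_min_le u b
  have m1 : t.foldl min a ∈ a :: t := by
    rcases PySem.List.foldl_min_mem t a with h | h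
    · rw [h]; exact List.mem_cons_self
    · exact List.mem_cons_of_mem _ h
  have m2 : u.foldl min b ∈ b :: u := by
    rcases PySem.List.foldl_min_mem u b with h | h
    · rw [h]; exact List.mem_cons_self
    · exact List.mem_cons_of_mem _ h
  have m1' := hp.mem_iff.mp m1
  have m2' := hp.mem_iff.mpr m2
  apply le_antisymm
  · rcases List.mem_cons.mp m2' with h | h
    · rw [h]; exact h1a
    · exact h1t _ h
  · rcases List.mem_cons.mp m1' with h | h
    · rw [h]; exact h2b
    · exact h2u _ h

lemma getA_some (letter : Char) (gs : List Char) :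
    ∀ (c : PySem.Dict Char Int) (m : Int), c.get? letter = some m → ∀ x,
    (gs.foldl (pvStepA letter) c).get? x =
      if x = letter then some (gs.foldl (fun mm g => min mm (pvD (pvLg letter) (pvLg g))) m)
      else c.get? x := by
  induction gs with
  | nil =>
      intro c m h x
      simp only [List.foldl_nil]
      split
      · next he => rw [he, h]
      · rfl
  | cons g gs ih =>
      intro c m h x
      have hct : c.contains letter = true := by
        rw [PySem.Dict.contains_eq_isSome_get?, h]; rfl
      have hstep : pvStepA letter c g =
          c.insert letter (min m (pvD (pvLg letter) (pvLg g))) := by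
        unfold pvStepA
        rw [hct]
        rw [PySem.Dict.getD_of_get?_eq_some _ _ h]
        simp
      simp only [List.foldl_cons, hstep]
      have h2 : (c.insert letter (min m (pvD (pvLg letter) (pvLg g)))).get? letter =
          some (min m (pvD (pvLg letter) (pvLg g))) := PySem.Dict.get?_insert_self _ _ _
      rw [ih _ _ h2 x]
      split
      · rfl
      · next hne => exact PySem.Dict.get?_insert_of_ne _ _ hne

def pvBestC (x : Char) (g0 : Char) (gs : List Char) : Int :=
  gs.foldl (fun m g => min m (pvD (pvLg x) (pvLg g))) (pvD (pvLg x) (pvLg g0))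

lemma getA_fresh (letter : Char) (g0 : Char) (gs : List Char) (c : PySem.Dict Char Int)
    (h : c.get? letter = none) (x : Char) :
    ((g0 :: gs).foldl (pvStepA letter) c).get? x =
      if x = letter then some (pvBestC letter g0 gs) else c.get? x := by
  have hct : c.contains letter = false := by
    rw [PySem.Dict.contains_eq_isSome_get?, h]; rfl
  have hstep : pvStepA letter c g0 = c.insert letter (pvD (pvLg letter) (pvLg g0)) := by
    unfold pvStepA; rw [hct]; simp
  simp only [List.foldl_cons, hstep]
  rw [getA_some letter gs _ _ (PySem.Dict.get?_insert_self _ _ _) x]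
  split
  · rfl
  · next hne => exact PySem.Dict.get?_insert_of_ne _ _ hne

lemma getA_outer (g0 : Char) (gs : List Char) (ls : List Char) (hnd : ls.Nodup) :
    ∀ (c : PySem.Dict Char Int), (∀ x ∈ ls, c.get? x = none) → ∀ x,
    (ls.foldl (fun c letter => ((g0 :: gs).foldl (pvStepA letter) c)) c).get? x =
      if x ∈ ls then some (pvBestC x g0 gs) else c.get? x := by
  induction ls with
  | nil => intro c hc x; simp
  | cons l ls ih =>
      intro c hc x
      have hl : c.get? l = none := hc l List.mem_cons_self
      have hfresh := getA_fresh l g0 gs c hl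
      have hc' : ∀ y ∈ ls, ((g0 :: gs).foldl (pvStepA l) c).get? y = none := by
        intro y hy
        have hne : y ≠ l := by
          intro he; subst he; exact (List.nodup_cons.mp hnd).1 hy
        rw [hfresh y, if_neg hne]
        exact hc y (List.mem_cons_of_mem _ hy)
      show (ls.foldl (fun c letter => ((g0 :: gs).foldl (pvStepA letter) c))
        ((g0 :: gs).foldl (pvStepA l) c)).get? x = _
      rw [ih (List.nodup_cons.mp hnd).2 _ hc' x]
      by_cases hx : x ∈ ls
      · rw [if_pos hx, if_pos (List.mem_cons_of_mem _ hx)]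
      · rw [if_neg hx, hfresh x]
        by_cases hxl : x = l
        · rw [if_pos hxl, if_pos (by rw [hxl]; exact List.mem_cons_self)]
          subst hxl; rfl
        · rw [if_neg hxl, if_neg (by simp [hxl, hx])]

def pvBestI (x : Char) (h0 : Int) (hs : List Int) : Int :=
  hs.foldl (fun m g => min m (pvD (pvLg x) g)) (pvD (pvLg x) h0)

lemma ofList_map_inj {α β : Type} [BEq α] [LawfulBEq α] [BEq β] [LawfulBEq β] (h : α → β)
    (hinj : Function.Injective h) (l : List α) :
    PySem.Set.ofList (l.map h) = (PySem.Set.ofList l).map h := by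
  induction l using List.reverseRecOn with
  | nil => rfl
  | append_singleton xs x ih =>
      rw [List.map_append, List.map_singleton, PySem.Set.ofList_append_singleton,
        PySem.Set.ofList_append_singleton, ih, PySem.Set.add_eq_ite, PySem.Set.add_eq_ite]
      by_cases hm : x ∈ PySem.Set.ofList xs
      · rw [if_pos hm, if_pos (List.mem_map_of_mem hm)]
      · rw [if_neg hm, if_neg (by
          intro hmm
          obtain ⟨a, ha, he⟩ := List.mem_map.mp hmm
          exact hm (hinj he ▸ ha)), List.map_append, List.map_singleton]

lemma best_eq (x : Char) (f : String) (g0 : Char) (gs : List Char) (h0 : Int) (hs : List Int)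
    (hA : PySem.Set.ofList f.toList = g0 :: gs)
    (hB : PySem.List.sorted (PySem.Set.ofList (f.toList.map pvLg)) (fun x => x) false = h0 :: hs) :
    pvBestC x g0 gs = pvBestI x h0 hs := by
  have hmap : PySem.Set.ofList (f.toList.map pvLg) = pvLg g0 :: gs.map pvLg := by
    rw [ofList_map_inj pvLg pvLg_inj, hA, List.map_cons]
  have hperm : (h0 :: hs).Perm (pvLg g0 :: gs.map pvLg) := by
    rw [← hmap, ← hB]; exact PySem.List.sorted_perm _ _ _
  set G : Int → Int := fun g => pvD (pvLg x) g with hG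
  have hperm2 : (G h0 :: hs.map G).Perm (G (pvLg g0) :: (gs.map pvLg).map G) := by
    have := hperm.map G
    simpa using this
  have hcore := foldl_min_perm (G h0) (hs.map G) (G (pvLg g0)) ((gs.map pvLg).map G) hperm2
  have hL : pvBestI x h0 hs = (hs.map G).foldl min (G h0) := by
    rw [List.foldl_map]; rfl
  have hR : pvBestC x g0 gs = ((gs.map pvLg).map G).foldl min (G (pvLg g0)) := by
    rw [List.foldl_map, List.foldl_map]; rfl
  rw [hL, hR, hcore]

lemma char_eq_of_toNat {a b : Char} (h : a.toNat = b.toNat) : a = b := by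
  apply Char.ext; unfold Char.toNat at h; exact UInt32.toNat_inj.mp h

lemma mem_alpha (c : Char) (h1' : 97 ≤ c.toNat) (h2' : c.toNat ≤ 122) :
    c ∈ "abcdefghijklmnopqrstuvwxyz".toList := by
  have hm : c.toNat ∈ "abcdefghijklmnopqrstuvwxyz".toList.map Char.toNat := by
    set n := c.toNat with hn
    interval_cases n <;> decide
  obtain ⟨a, ha, he⟩ := List.mem_map.mp hm
  rwa [char_eq_of_toNat he] at ha

-- B-side lemmas

lemma fold_split (L : List Int) (lp : Int) : ∀ (a b : Int),
    L.foldl (fun m g => min m (pvD lp g)) (min a (26 - b)) =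
      min (L.foldl (fun m g => min m |g - lp|) a)
          (26 - L.foldl (fun m g => max m |g - lp|) b) := by
  induction L with
  | nil => intro a b; rfl
  | cons g L ih =>
      intro a b
      simp only [List.foldl_cons]
      have hkey : min (min a (26 - b)) (pvD lp g) =
          min (min a |g - lp|) (26 - max b |g - lp|) := by
        unfold pvD
        rcases abs_cases (g - lp) with ⟨he, _⟩ | ⟨he, _⟩ <;> rw [he] <;> omega
      rw [hkey, ih]

lemma foldl_min_eq_of (t : List Int) (a target : Int)
    (h1 : target = a ∨ target ∈ t) (h2 : target ≤ a) (h3 : ∀ x ∈ t, target ≤ x) :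
    t.foldl min a = target := by
  obtain ⟨hle_a, hle⟩ := PySem.List.foldl_min_le t a
  apply le_antisymm
  · rcases h1 with h | h
    · rw [h]; exact hle_a
    · exact hle _ h
  · rcases PySem.List.foldl_min_mem t a with hm | hm
    · rw [hm]; exact h2
    · exact h3 _ hm

lemma foldl_max_eq_of (t : List Int) (a target : Int)
    (h1 : target = a ∨ target ∈ t) (h2 : a ≤ target) (h3 : ∀ x ∈ t, x ≤ target) :
    t.foldl max a = target := by
  obtain ⟨hge_a, hge⟩ := PySem.List.le_foldl_max t a
  apply le_antisymm
  · rcases PySem.List.foldl_max_mem t a with hm | hm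
    · rw [hm]; exact h2
    · exact h3 _ hm
  · rcases h1 with h | h
    · rw [h]; exact hge_a
    · exact hge _ h

lemma lb_spec (gs : List Int) (lp : Int)
    (hsort : ∀ i j : Nat, (hij : i < j) → (hj : j < gs.length) → gs[i]'(Nat.lt_trans hij hj) ≤ gs[j]) :
    ∀ lo hi : Nat, lo ≤ hi → hi ≤ gs.length →
    (∀ i : Nat, i < lo → (hi' : i < gs.length) → gs[i] < lp) →
    (∀ i : Nat, hi ≤ i → (hi' : i < gs.length) → lp ≤ gs[i]) →
    lo ≤ pvLowerBound gs lp lo hi ∧ pvLowerBound gs lp lo hi ≤ hi ∧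
    (∀ i : Nat, i < pvLowerBound gs lp lo hi → (hi' : i < gs.length) → gs[i] < lp) ∧
    (∀ i : Nat, pvLowerBound gs lp lo hi ≤ i → (hi' : i < gs.length) → lp ≤ gs[i]) := by
  have H : ∀ k lo hi : Nat, hi - lo ≤ k → lo ≤ hi → hi ≤ gs.length →
      (∀ i : Nat, i < lo → (hi' : i < gs.length) → gs[i] < lp) →
      (∀ i : Nat, hi ≤ i → (hi' : i < gs.length) → lp ≤ gs[i]) →
      lo ≤ pvLowerBound gs lp lo hi ∧ pvLowerBound gs lp lo hi ≤ hi ∧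
      (∀ i : Nat, i < pvLowerBound gs lp lo hi → (hi' : i < gs.length) → gs[i] < lp) ∧
      (∀ i : Nat, pvLowerBound gs lp lo hi ≤ i → (hi' : i < gs.length) → lp ≤ gs[i]) := by
    intro k
    induction k with
    | zero =>
        intro lo hi hk hlh hhl H1 H2
        have he : lo = hi := by omega
        rw [pvLowerBound, if_neg (by omega)]
        subst he
        exact ⟨le_refl _, le_refl _, H1, H2⟩
    | succ k ih =>
        intro lo hi hk hlh hhl H1 H2
        by_cases h : lo < hi
        · rw [pvLowerBound, if_pos h]
          simp only
          set mid := (lo + hi) / 2 with hmid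
          have hmlt : mid < hi := by omega
          have hmge : lo ≤ mid := by omega
          have hmlen : mid < gs.length := by omega
          have hgetd : gs.getD mid 0 = gs[mid] := List.getD_eq_getElem gs 0 hmlen
          by_cases hg : gs.getD mid 0 < lp
          · rw [if_pos hg]
            have H1' : ∀ i : Nat, i < mid + 1 → (hi' : i < gs.length) → gs[i] < lp := by
              intro i hilt hi'
              rcases Nat.lt_or_ge i mid with hi2 | hi2
              · exact lt_of_le_of_lt (hsort i mid hi2 hmlen) (hgetd ▸ hg)
              · have : i = mid := by omega
                subst this; exact hgetd ▸ hg
            obtain ⟨r1, r2, r3, r4⟩ := ih (mid + 1) hi (by omega) (by omega) hhl H1' H2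
            exact ⟨by omega, r2, r3, r4⟩
          · rw [if_neg hg]
            have H2' : ∀ i : Nat, mid ≤ i → (hi' : i < gs.length) → lp ≤ gs[i] := by
              intro i hile hi'
              rcases Nat.lt_or_ge mid i with hi2 | hi2
              · exact le_trans (hgetd ▸ le_of_not_gt hg) (hsort mid i hi2 hi')
              · have : i = mid := by omega
                subst this; exact hgetd ▸ le_of_not_gt hg
            obtain ⟨r1, r2, r3, r4⟩ := ih lo mid (by omega) (by omega) (by omega) H1 H2'
            exact ⟨r1, by omega, r3, r4⟩
        · rw [pvLowerBound, if_neg h]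
          have he : lo = hi := by omega
          subst he
          exact ⟨le_refl _, le_refl _, H1, H2⟩
  intro lo hi
  exact H (hi - lo) lo hi (le_refl _)

-- B's per-character computation (the body of Source B's loop), used to state the pointwise lemmas
def pvPhiB (gs : List Int) (lp : Int) : Int :=
  let n : Nat := gs.length
  let lo := pvLowerBound gs lp 0 n
  let near : Int :=
    if lo = n then lp - gs.getD (n - 1) 0
    else if lo = 0 then gs.getD 0 0 - lp
    else min (gs.getD lo 0 - lp) (lp - gs.getD (lo - 1) 0)
  let far : Int := max (gs.getD (n - 1) 0 - lp) (lp - gs.getD 0 0)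
  min near (26 - far)

lemma foldl_minf_eq_of (t : List Int) (fn : Int → Int) (a target : Int)
    (h1 : target = a ∨ ∃ x ∈ t, target = fn x) (h2 : target ≤ a)
    (h3 : ∀ x ∈ t, target ≤ fn x) :
    t.foldl (fun m g => min m (fn g)) a = target := by
  rw [← List.foldl_map]
  apply foldl_min_eq_of
  · rcases h1 with h | ⟨x, hx, he⟩
    · exact Or.inl h
    · exact Or.inr (he ▸ List.mem_map_of_mem hx)
  · exact h2
  · intro x hx
    obtain ⟨g, hg, rfl⟩ := List.mem_map.mp hx
    exact h3 g hg

lemma foldl_maxf_eq_of (t : List Int) (fn : Int → Int) (a target : Int)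
    (h1 : target = a ∨ ∃ x ∈ t, target = fn x) (h2 : a ≤ target)
    (h3 : ∀ x ∈ t, fn x ≤ target) :
    t.foldl (fun m g => max m (fn g)) a = target := by
  rw [← List.foldl_map]
  apply foldl_max_eq_of
  · rcases h1 with h | ⟨x, hx, he⟩
    · exact Or.inl h
    · exact Or.inr (he ▸ List.mem_map_of_mem hx)
  · exact h2
  · intro x hx
    obtain ⟨g, hg, rfl⟩ := List.mem_map.mp hx
    exact h3 g hg

lemma phiB_eq (h0 : Int) (rest : List Int) (lp : Int)
    (hpw : (h0 :: rest).Pairwise (fun a b => a ≤ b)) :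
    rest.foldl (fun m g => min m (pvD lp g)) (pvD lp h0) = pvPhiB (h0 :: rest) lp := by
  set gs : List Int := h0 :: rest with hgs
  have hsort : ∀ i j : Nat, (hij : i < j) → (hj : j < gs.length) →
      gs[i]'(Nat.lt_trans hij hj) ≤ gs[j] := by
    intro i j hij hj
    exact List.pairwise_iff_getElem.mp hpw i j (by omega) hj hij
  set n : Nat := gs.length with hndef
  have hmono : ∀ i j : Nat, (hij : i ≤ j) → (hj : j < n) → gs[i]'(Nat.lt_of_le_of_lt hij hj) ≤ gs[j] := by
    intro i j hij hj
    rcases Nat.lt_or_eq_of_le hij with h | h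
    · exact hsort i j h hj
    · subst h; exact le_refl _
  have hn : n = rest.length + 1 := rfl
  obtain ⟨hr0, hrn, hlt, hge⟩ := lb_spec gs lp hsort 0 n (by omega) (le_refl _)
      (by intro i h hi'; exact absurd h (Nat.not_lt_zero i))
      (by intro i h hi'; exact absurd hi' (by omega))
  set r := pvLowerBound gs lp 0 n with hrdef
  set near : Int :=
    (if r = n then lp - gs.getD (n - 1) 0
     else if r = 0 then gs.getD 0 0 - lp
     else min (gs.getD r 0 - lp) (lp - gs.getD (r - 1) 0)) with hneardef
  set far : Int := max (gs.getD (n - 1) 0 - lp) (lp - gs.getD 0 0) with hfardef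
  have hphi : pvPhiB gs lp = min near (26 - far) := rfl
  have hgd : ∀ k : Nat, (hk : k < n) → gs.getD k 0 = gs[k] := by
    intro k hk; exact List.getD_eq_getElem gs 0 hk
  have hmem : ∀ k : Nat, (hk : k < n) →
      (|gs[k]'hk - lp| = |h0 - lp| ∨ ∃ x ∈ rest, |gs[k]'hk - lp| = |x - lp|) := by
    intro k hk
    cases k with
    | zero => left; rfl
    | succ k =>
        right
        have hk' : k < rest.length := by omega
        exact ⟨rest[k]'hk', List.getElem_mem hk', rfl⟩
  have hub : ∀ i : Nat, (hi : i < n) → near ≤ |gs[i]'hi - lp| := by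
    intro i hi
    rcases Nat.lt_or_ge i r with hir | hir
    · have h1 : gs[i]'hi < lp := hlt i hir hi
      have hr1 : 1 ≤ r := by omega
      have hrm : r - 1 < n := by omega
      have hle : gs[i]'hi ≤ gs[r - 1]'hrm := hmono i (r - 1) (by omega) hrm
      by_cases hrn2 : r = n
      · have hneq : n - 1 = r - 1 := by omega
        rw [hneardef, if_pos hrn2, hneq, hgd (r - 1) hrm]
        rcases abs_cases (gs[i]'hi - lp) with ⟨he, _⟩ | ⟨he, _⟩ <;> omega
      · have hr0 : ¬ r = 0 := by omega
        rw [hneardef, if_neg hrn2, if_neg hr0, hgd r (by omega), hgd (r - 1) hrm]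
        rcases abs_cases (gs[i]'hi - lp) with ⟨he, _⟩ | ⟨he, _⟩ <;> omega
    · have h1 : lp ≤ gs[i]'hi := hge i hir hi
      have hrn' : r < n := by omega
      have hle : gs[r]'hrn' ≤ gs[i]'hi := hmono r i hir hi
      have hrn2 : ¬ r = n := by omega
      rw [hneardef, if_neg hrn2]
      by_cases hr0 : r = 0
      · rw [if_pos hr0, hgd 0 (by omega)]
        simp only [hr0] at hle
        rcases abs_cases (gs[i]'hi - lp) with ⟨he, _⟩ | ⟨he, _⟩ <;> omega
      · rw [if_neg hr0, hgd r hrn', hgd (r - 1) (by omega)]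
        rcases abs_cases (gs[i]'hi - lp) with ⟨he, _⟩ | ⟨he, _⟩ <;> omega
  have hlb : ∀ i : Nat, (hi : i < n) → |gs[i]'hi - lp| ≤ far := by
    intro i hi
    have hk0 : (0 : Nat) < n := by omega
    have hkn : n - 1 < n := by omega
    have h1 : gs[0]'hk0 ≤ gs[i]'hi := hmono 0 i (by omega) hi
    have h2 : gs[i]'hi ≤ gs[n - 1]'hkn := hmono i (n - 1) (by omega) hkn
    rw [hfardef, hgd (n - 1) hkn, hgd 0 hk0]
    rcases abs_cases (gs[i]'hi - lp) with ⟨he, _⟩ | ⟨he, _⟩ <;> omega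
  have hminA : rest.foldl (fun m g => min m |g - lp|) |h0 - lp| = near := by
    apply foldl_minf_eq_of
    · by_cases hrn2 : r = n
      · have hk : n - 1 < n := by omega
        have hlt' : gs[n - 1]'hk < lp := hlt (n - 1) (by omega) hk
        have he : near = |gs[n - 1]'hk - lp| := by
          rw [hneardef, if_pos hrn2, hgd (n - 1) hk]
          rcases abs_cases (gs[n - 1]'hk - lp) with ⟨he, _⟩ | ⟨he, _⟩ <;> omega
        rw [he]; exact hmem (n - 1) hk
      · by_cases hr0 : r = 0
        · have hk : (0 : Nat) < n := by omega
          have hge' : lp ≤ gs[0]'hk := hge 0 (by omega) hk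
          have he : near = |gs[0]'hk - lp| := by
            rw [hneardef, if_neg hrn2, if_pos hr0, hgd 0 hk]
            rcases abs_cases (gs[0]'hk - lp) with ⟨he, _⟩ | ⟨he, _⟩ <;> omega
          rw [he]; exact hmem 0 hk
        · have hkr : r < n := by omega
          have hkrm : r - 1 < n := by omega
          have hgeR : lp ≤ gs[r]'hkr := hge r (le_refl _) hkr
          have hltR : gs[r - 1]'hkrm < lp := hlt (r - 1) (by omega) hkrm
          rcases le_total (gs[r]'hkr - lp) (lp - gs[r - 1]'hkrm) with hc | hc
          · have he : near = |gs[r]'hkr - lp| := by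
              rw [hneardef, if_neg hrn2, if_neg hr0, hgd r hkr, hgd (r - 1) hkrm]
              rcases abs_cases (gs[r]'hkr - lp) with ⟨he, _⟩ | ⟨he, _⟩ <;> omega
            rw [he]; exact hmem r hkr
          · have he : near = |gs[r - 1]'hkrm - lp| := by
              rw [hneardef, if_neg hrn2, if_neg hr0, hgd r hkr, hgd (r - 1) hkrm]
              rcases abs_cases (gs[r - 1]'hkrm - lp) with ⟨he, _⟩ | ⟨he, _⟩ <;> omega
            rw [he]; exact hmem (r - 1) hkrm
    · exact hub 0 (by omega)
    · intro x hx
      obtain ⟨j, hj, rfl⟩ := List.mem_iff_getElem.mp hx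
      exact hub (j + 1) (by omega)
  have hmaxA : rest.foldl (fun m g => max m |g - lp|) |h0 - lp| = far := by
    apply foldl_maxf_eq_of
    · have hk0 : (0 : Nat) < n := by omega
      have hkn : n - 1 < n := by omega
      have h0n : gs[0]'hk0 ≤ gs[n - 1]'hkn := hmono 0 (n - 1) (by omega) hkn
      rcases le_total (gs[n - 1]'hkn - lp) (lp - gs[0]'hk0) with hc | hc
      · have he : far = |gs[0]'hk0 - lp| := by
          rw [hfardef, hgd (n - 1) hkn, hgd 0 hk0]
          rcases abs_cases (gs[0]'hk0 - lp) with ⟨he, _⟩ | ⟨he, _⟩ <;> omega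
        rw [he]; exact hmem 0 hk0
      · have he : far = |gs[n - 1]'hkn - lp| := by
          rw [hfardef, hgd (n - 1) hkn, hgd 0 hk0]
          rcases abs_cases (gs[n - 1]'hkn - lp) with ⟨he, _⟩ | ⟨he, _⟩ <;> omega
        rw [he]; exact hmem (n - 1) hkn
    · exact hlb 0 (by omega)
    · intro x hx
      obtain ⟨j, hj, rfl⟩ := List.mem_iff_getElem.mp hx
      exact hlb (j + 1) (by omega)
  calc rest.foldl (fun m g => min m (pvD lp g)) (pvD lp h0)
      = min (rest.foldl (fun m g => min m |g - lp|) |h0 - lp|)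
            (26 - rest.foldl (fun m g => max m |g - lp|) |h0 - lp|) :=
        fold_split rest lp |h0 - lp| |h0 - lp|
    _ = min near (26 - far) := by rw [hminA, hmaxA]
    _ = pvPhiB gs lp := hphi.symm

lemma func_eq_alt (s f : String) (hpre : Pre_func s f) : func s f = func_alt s f := by
  by_cases hs : s.toList = []
  · rw [func_eq, hs]
    unfold func_alt
    rw [if_pos hs]
    rfl
  · have hf : f.toList ≠ [] := by
      rcases hpre with h | ⟨h, _⟩
      · exact absurd h hs
      · exact h
    have hlow : s.toList.all (fun c => 97 ≤ c.toNat && c.toNat ≤ 122) = true := by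
      rcases hpre with h | ⟨_, h⟩
      · exact absurd h hs
      · exact h
    obtain ⟨cf, tf, hft⟩ : ∃ c t, f.toList = c :: t := by
      cases hft : f.toList with
      | nil => exact absurd hft hf
      | cons c t => exact ⟨c, t, rfl⟩
    have hgoal_ne : PySem.Set.ofList f.toList ≠ [] := by
      intro h
      have : cf ∈ PySem.Set.ofList f.toList :=
        (PySem.Set.mem_ofList _ _).mpr (by rw [hft]; exact List.mem_cons_self)
      rw [h] at this; cases this
    obtain ⟨g0, gs, hA⟩ : ∃ g0 gs, PySem.Set.ofList f.toList = g0 :: gs := by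
      cases hA : PySem.Set.ofList f.toList with
      | nil => exact absurd hA hgoal_ne
      | cons a b => exact ⟨a, b, rfl⟩
    obtain ⟨h0, hsrt, hB⟩ : ∃ h0 hsrt,
        PySem.List.sorted (PySem.Set.ofList (f.toList.map pvLg)) (fun x => x) false = h0 :: hsrt := by
      cases hB : PySem.List.sorted (PySem.Set.ofList (f.toList.map pvLg)) (fun x => x) false with
      | nil =>
          exfalso
          have := (PySem.List.sorted_eq_nil_iff _ _ _).mp hB
          rw [ofList_map_inj pvLg pvLg_inj, hA] at this
          cases this
      | cons a b => exact ⟨a, b, rfl⟩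
    have hpw : (h0 :: hsrt).Pairwise (fun a b => a ≤ b) := by
      rw [← hB]
      simpa using PySem.List.sorted_pairwise
        (PySem.Set.ofList (f.toList.map pvLg)) (fun x : Int => x)
    have halt : func_alt s f = s.toList.foldl
        (fun total l => total +
          pvPhiB (PySem.List.sorted (PySem.Set.ofList (f.toList.map pvLg)) (fun x => x) false)
            (pvLg l)) 0 := by
      unfold func_alt pvPhiB pvLg
      rw [if_neg hs]
    rw [func_eq, halt, hB]
    rw [PySem.List.foldl_add, PySem.List.foldl_add]
    have hmapc : s.toList.map (fun l =>
        (("abcdefghijklmnopqrstuvwxyz".toList.foldl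
          (fun c letter => (PySem.Set.ofList f.toList).foldl (pvStepA letter) c)
          PySem.Dict.empty)).getD l 0)
        = s.toList.map (fun l => pvPhiB (h0 :: hsrt) (pvLg l)) := by
      apply List.map_congr_left
      intro l hl
      have hlbnd := List.all_eq_true.mp hlow l hl
      have hmem2 : l ∈ "abcdefghijklmnopqrstuvwxyz".toList :=
        mem_alpha l (by simpa using (Bool.and_elim_left hlbnd))
          (by simpa using (Bool.and_elim_right hlbnd))
      have halpha_nodup : ("abcdefghijklmnopqrstuvwxyz".toList).Nodup := by decide
      have hempty : ∀ x ∈ "abcdefghijklmnopqrstuvwxyz".toList,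
          (PySem.Dict.empty : PySem.Dict Char Int).get? x = none := by
        intro x _; rfl
      have hget := getA_outer g0 gs _ halpha_nodup PySem.Dict.empty hempty
      rw [hA]
      rw [PySem.Dict.getD_of_get?_eq_some _ 0 (by rw [hget l, if_pos hmem2])]
      rw [best_eq l f g0 gs h0 hsrt hA hB]
      exact phiB_eq h0 hsrt (pvLg l) hpw
    rw [hmapc]

-- ===== VERDICT (by name: the statement is the Claim_ definition above) =====
theorem func_spec : Claim_equal_func := by
  intro s f _ hpre
  show func s f = func_alt s f
  exact func_eq_alt s f hpre
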